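-- pv_equiv track=rewrite | github.com/Utah-MMC/icon | scraper/enhanced_lead_generator.py | estimate_project_value
-- ===== SOURCE A (Python) =====
-- def estimate_project_value(project_desc: str) -> int:
--     """Estimate project value based on description"""
--     if not project_desc:
--         return 15000
--
--     desc_lower = project_desc.lower()
--
--     if any(word in desc_lower for word in ['demolition', 'warehouse', 'commercial']):
--         return 50000
--     elif any(word in desc_lower for word in ['renovation', 'remodel', 'addition']):
--         return 35000
--     elif any(word in desc_lower for word in ['roofing', 'siding', 'deck']):
--         return 20000
--     else:
--         return 15000
-- ===== SOURCE B (Python) =====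
-- # B: one flat keyword->value table and a single max-accumulating pass (different decomposition from A's if/elif chain).
-- _KEYWORD_VALUES = {
--     'demolition': 50000, 'warehouse': 50000, 'commercial': 50000,
--     'renovation': 35000, 'remodel': 35000, 'addition': 35000,
--     'roofing': 20000, 'siding': 20000, 'deck': 20000,
-- }
--
-- def estimate_project_value(project_desc: str) -> int:
--     if not project_desc:
--         return 15000
--     desc_lower = project_desc.lower()
--     value = 15000
--     for kw, v in _KEYWORD_VALUES.items():
--         if kw in desc_lower:
--             value = max(value, v)
--     return value
-- ===== Notes on version B (the rewrite author's own statement) =====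
-- stated objective: simpler
-- what changed: Replaces the three-branch if/elif chain of any() scans with one flat keyword-to-value table and a single max-accumulating pass; equivalent because the chain's priority order coincides with descending values.
import Mathlib
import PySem

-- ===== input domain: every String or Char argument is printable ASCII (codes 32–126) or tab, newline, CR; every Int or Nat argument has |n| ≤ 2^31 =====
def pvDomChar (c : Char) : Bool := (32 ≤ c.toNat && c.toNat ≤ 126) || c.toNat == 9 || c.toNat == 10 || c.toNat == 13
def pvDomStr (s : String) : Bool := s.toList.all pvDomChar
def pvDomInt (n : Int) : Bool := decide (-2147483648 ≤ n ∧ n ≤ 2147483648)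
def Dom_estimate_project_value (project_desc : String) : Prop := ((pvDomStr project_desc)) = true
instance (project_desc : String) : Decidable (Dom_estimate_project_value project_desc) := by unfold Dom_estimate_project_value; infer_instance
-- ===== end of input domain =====

-- B replaces A's if/elif chain with one flat keyword→value table and a single max-accumulating pass (simpler decomposition).

-- ===== PORT A =====
def estimate_project_value (project_desc : String) : Int :=
  if project_desc = "" then 15000
  else
    let desc_lower := PySem.Str.lower project_desc
    if ["demolition", "warehouse", "commercial"].any (fun w => PySem.Str.isIn w desc_lower) then 50000
    else if ["renovation", "remodel", "addition"].any (fun w => PySem.Str.isIn w desc_lower) then 35000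
    else if ["roofing", "siding", "deck"].any (fun w => PySem.Str.isIn w desc_lower) then 20000
    else 15000

-- ===== PORT B =====
-- the flat keyword→value table (dict iterated in insertion order)
def pvKeywordValues : List (String × Int) :=
  [("demolition", 50000), ("warehouse", 50000), ("commercial", 50000),
   ("renovation", 35000), ("remodel", 35000), ("addition", 35000),
   ("roofing", 20000), ("siding", 20000), ("deck", 20000)]

def estimate_project_value_alt (project_desc : String) : Int :=
  if project_desc = "" then 15000
  else
    let desc_lower := PySem.Str.lower project_desc
    pvKeywordValues.foldl
      (fun value kv => if PySem.Str.isIn kv.1 desc_lower then max value kv.2 else value) 15000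

-- ===== PRECONDITION & SPEC =====
def Spec_estimate_project_value (project_desc : String) (out : Int) : Prop := out = estimate_project_value_alt project_desc
instance (project_desc : String) (out : Int) : Decidable (Spec_estimate_project_value project_desc out) := by unfold Spec_estimate_project_value; infer_instance

-- ===== CLAIM (what is proved, stated in full; the proofs are below) =====
def Claim_equal_estimate_project_value : Prop := ∀ (project_desc : String), Dom_estimate_project_value project_desc → Spec_estimate_project_value project_desc (estimate_project_value project_desc)

-- ===== LEMMAS AND PROOFS =====

-- ===== VERDICT (by name: the statement is the Claim_ definition above) =====
theorem estimate_project_value_spec : Claim_equal_estimate_project_value := by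
  intro s _
  unfold Spec_estimate_project_value estimate_project_value estimate_project_value_alt pvKeywordValues
  by_cases h : s = ""
  · simp [h]
  · simp only [h, if_false, List.any, List.foldl, Bool.or_eq_true]
    generalize PySem.Str.isIn "demolition" (PySem.Str.lower s) = b1
    generalize PySem.Str.isIn "warehouse" (PySem.Str.lower s) = b2
    generalize PySem.Str.isIn "commercial" (PySem.Str.lower s) = b3
    generalize PySem.Str.isIn "renovation" (PySem.Str.lower s) = b4
    generalize PySem.Str.isIn "remodel" (PySem.Str.lower s) = b5
    generalize PySem.Str.isIn "addition" (PySem.Str.lower s) = b6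
    generalize PySem.Str.isIn "roofing" (PySem.Str.lower s) = b7
    generalize PySem.Str.isIn "siding" (PySem.Str.lower s) = b8
    generalize PySem.Str.isIn "deck" (PySem.Str.lower s) = b9
    revert b1 b2 b3 b4 b5 b6 b7 b8 b9
    decide
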